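-- pv_equiv track=rewrite | github.com/athrvakulkarni11/newgate-2 | organization_searcher.py | _parse_leadership_section
-- ===== SOURCE A (Python) =====
-- from typing import Dict, List, Optional
--
-- def _parse_leadership_section(section: str) -> List[Dict]:
--     """Parse leadership section"""
--     leaders = []
--     current_leader = {}
--
--     for line in section.split('\n'):
--         line = line.strip()
--         if not line:
--             continue
--
--         if line.startswith('Leader:'):
--             if current_leader:
--                 leaders.append(current_leader)
--             current_leader = {'name': line.replace('Leader:', '').strip()}
--         elif line.startswith('Position:'):
--             current_leader['position'] = line.replace('Position:', '').strip()
--         elif line.startswith('Background:'):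
--             current_leader['background'] = line.replace('Background:', '').strip()
--
--     if current_leader:  # Add the last leader
--         leaders.append(current_leader)
--
--     return leaders
-- ===== SOURCE B (Python) =====
-- def _parse_leadership_section(section):
--     _FIELDS = (('Leader:', 'name'), ('Position:', 'position'), ('Background:', 'background'))
--     # pass 1: extract (key, value) fields from the lines that carry one
--     fields = []
--     for raw in section.split('\n'):
--         line = raw.strip()
--         for prefix, key in _FIELDS:
--             if line.startswith(prefix):
--                 fields.append((key, line.replace(prefix, '').strip()))
--                 break
--     # pass 2: group fields into records; a 'name' field opens a new record,
--     # and any field with no open record opens one too (orphan fields)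
--     records = []
--     started = False
--     for key, value in fields:
--         if key == 'name' or not started:
--             records.append({})
--             started = True
--         records[-1][key] = value
--     return records
-- ===== Notes on version B (the rewrite author's own statement) =====
-- stated objective: alternative
-- what changed: Replaces the single per-line branch loop carrying a mutable current dict with two passes: a prefix-table pass extracting key/value fields from the lines, then a grouping pass where a Leader-derived field (or an orphan field with no open record) opens a new record and each field is written into the last record.
import Mathlib
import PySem

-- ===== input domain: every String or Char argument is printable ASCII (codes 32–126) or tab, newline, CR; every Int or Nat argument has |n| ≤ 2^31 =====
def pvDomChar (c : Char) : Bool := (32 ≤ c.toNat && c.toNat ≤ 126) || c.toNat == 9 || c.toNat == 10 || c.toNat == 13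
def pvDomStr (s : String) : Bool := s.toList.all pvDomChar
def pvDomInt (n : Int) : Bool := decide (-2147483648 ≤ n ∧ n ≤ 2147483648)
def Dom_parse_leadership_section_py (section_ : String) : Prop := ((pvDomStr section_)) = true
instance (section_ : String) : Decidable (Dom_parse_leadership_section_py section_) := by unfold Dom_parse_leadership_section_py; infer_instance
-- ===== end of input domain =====

-- B replaces A's single per-line branch loop (mutable current dict) with two passes: a
-- prefix-table pass extracting (key, value) fields, then a grouping pass into records.
-- Same cost; objective: alternative decomposition.

-- ===== PORT A =====
-- one iteration of A's for-loop; state = (leaders, current_leader)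
def pvStepA (st : List (PySem.Dict String String) × PySem.Dict String String) (raw : List Char) :
    List (PySem.Dict String String) × PySem.Dict String String :=
  let line := PySem.Chars.strip raw
  if line = [] then st
  else if PySem.Chars.startswith line "Leader:".toList then
    ((if st.2.items.isEmpty then st.1 else st.1 ++ [st.2]),
     PySem.Dict.ofList [("name", String.ofList (PySem.Chars.strip (PySem.Chars.replace line "Leader:".toList [])))])
  else if PySem.Chars.startswith line "Position:".toList then
    (st.1, st.2.insert "position" (String.ofList (PySem.Chars.strip (PySem.Chars.replace line "Position:".toList []))))
  else if PySem.Chars.startswith line "Background:".toList then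
    (st.1, st.2.insert "background" (String.ofList (PySem.Chars.strip (PySem.Chars.replace line "Background:".toList []))))
  else st

def parse_leadership_section_py (section_ : String) : List (List (String × String)) :=
  let fin := (PySem.Chars.splitOn section_.toList "\n".toList).foldl pvStepA ([], PySem.Dict.empty)
  ((if fin.2.items.isEmpty then fin.1 else fin.1 ++ [fin.2]).map (·.items))

-- ===== PORT B =====
-- the prefix → key table of Source B
def pvFieldTable : List (List Char × String) :=
  [("Leader:".toList, "name"), ("Position:".toList, "position"), ("Background:".toList, "background")]

-- Source B's inner for/break over the table: first matching prefix yields the field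
def pvFindField : List (List Char × String) → List Char → Option (String × String)
  | [], _ => none
  | (pre, key) :: rest, line =>
    if PySem.Chars.startswith line pre then
      some (key, String.ofList (PySem.Chars.strip (PySem.Chars.replace line pre [])))
    else pvFindField rest line

-- pass 1 accumulator: fields.append(...) when a prefix matches
def pvExtract (acc : List (String × String)) (raw : List Char) : List (String × String) :=
  match pvFindField pvFieldTable (PySem.Chars.strip raw) with
  | some f => acc ++ [f]
  | none => acc

-- records[-1][key] = value
def pvSetLast (rs : List (PySem.Dict String String)) (key v : String) : List (PySem.Dict String String) :=
  match rs with
  | [] => []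
  | [d] => [d.insert key v]
  | d :: e :: rest => d :: pvSetLast (e :: rest) key v

-- pass 2: one field; a 'name' field (or any field with no open record) opens a new record
def pvGroupStep (st : List (PySem.Dict String String) × Bool) (f : String × String) :
    List (PySem.Dict String String) × Bool :=
  ((pvSetLast (if f.1 = "name" ∨ st.2 = false then st.1 ++ [PySem.Dict.empty] else st.1) f.1 f.2), true)

def parse_leadership_section_py_alt (section_ : String) : List (List (String × String)) :=
  let fields := (PySem.Chars.splitOn section_.toList "\n".toList).foldl pvExtract []
  ((fields.foldl pvGroupStep ([], false)).1).map (·.items)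

-- ===== PRECONDITION & SPEC =====
def Spec_parse_leadership_section_py (section_ : String) (out : List (List (String × String))) : Prop := out = parse_leadership_section_py_alt section_
instance (section_ : String) (out : List (List (String × String))) : Decidable (Spec_parse_leadership_section_py section_ out) := by unfold Spec_parse_leadership_section_py; infer_instance

-- ===== CLAIM (what is proved, stated in full; the proofs are below) =====
def Claim_equal_parse_leadership_section_py : Prop := ∀ (section_ : String), Dom_parse_leadership_section_py section_ → Spec_parse_leadership_section_py section_ (parse_leadership_section_py section_)

-- ===== LEMMAS AND PROOFS =====

-- B processed line by line: extract-then-group equals per-line grouping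
def pvLineStepB (st : List (PySem.Dict String String) × Bool) (raw : List Char) :
    List (PySem.Dict String String) × Bool :=
  match pvFindField pvFieldTable (PySem.Chars.strip raw) with
  | some f => pvGroupStep st f
  | none => st

-- A's final flush of current_leader
def pvFinishA (st : List (PySem.Dict String String) × PySem.Dict String String) :
    List (PySem.Dict String String) :=
  if st.2.items.isEmpty then st.1 else st.1 ++ [st.2]

-- the state relation between A's (leaders, current_leader) and B's (records, started)
def pvInv (lA : List (PySem.Dict String String)) (cA : PySem.Dict String String)
    (rB : List (PySem.Dict String String)) (sB : Bool) : Prop :=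
  (sB = false ∧ cA = PySem.Dict.empty ∧ lA = [] ∧ rB = []) ∨
  (sB = true ∧ cA.items ≠ [] ∧ rB = lA ++ [cA])

lemma pvSetLast_append (rs : List (PySem.Dict String String)) (d : PySem.Dict String String)
    (k v : String) : pvSetLast (rs ++ [d]) k v = rs ++ [d.insert k v] := by
  induction rs with
  | nil => rfl
  | cons a rs ih =>
    cases rs with
    | nil => rfl
    | cons b rs' => simpa [pvSetLast] using ih

lemma pv_items_insert_ne_nil (d : PySem.Dict String String) (k v : String) :
    (d.insert k v).items ≠ [] := by
  rw [PySem.Dict.items_insert]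
  split
  · rename_i hc
    intro h
    rw [List.map_eq_nil_iff] at h
    have := (PySem.Dict.contains_iff_mem_keys d k).mp hc
    simp only [PySem.Dict.keys, h] at this
    simp at this
  · simp

lemma pvCompose : ∀ (lines : List (List Char)) (acc : List (String × String))
    (s : List (PySem.Dict String String) × Bool),
    (lines.foldl pvExtract acc).foldl pvGroupStep s = lines.foldl pvLineStepB (acc.foldl pvGroupStep s)
  | [], _, _ => rfl
  | raw :: rest, acc, s => by
    simp only [List.foldl_cons]
    rw [pvCompose rest (pvExtract acc raw) s]
    congr 1
    unfold pvExtract pvLineStepB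
    cases h : pvFindField pvFieldTable (PySem.Chars.strip raw) with
    | none => rfl
    | some f => simp [List.foldl_append]

lemma pvStepInv (raw : List Char) (lA : List (PySem.Dict String String))
    (cA : PySem.Dict String String) (rB : List (PySem.Dict String String)) (sB : Bool)
    (h : pvInv lA cA rB sB) :
    pvInv (pvStepA (lA, cA) raw).1 (pvStepA (lA, cA) raw).2
      (pvLineStepB (rB, sB) raw).1 (pvLineStepB (rB, sB) raw).2 := by
  simp only [pvStepA, pvLineStepB, pvFindField, pvFieldTable]
  by_cases h0 : PySem.Chars.strip raw = []
  · simp only [h0,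
      show PySem.Chars.startswith ([] : List Char) "Leader:".toList = false from by decide,
      show PySem.Chars.startswith ([] : List Char) "Position:".toList = false from by decide,
      show PySem.Chars.startswith ([] : List Char) "Background:".toList = false from by decide,
      Bool.false_eq_true, if_false]
    exact h
  · rw [if_neg h0]
    cases hL : PySem.Chars.startswith (PySem.Chars.strip raw) "Leader:".toList with
    | true =>
      simp only [if_true, pvGroupStep]
      rcases h with ⟨hs, hc, hl, hr⟩ | ⟨hs, hc, hr⟩
      · subst hs hc hl hr
        rw [if_pos (Or.inl trivial)]
        right
        exact ⟨rfl, pv_items_insert_ne_nil PySem.Dict.empty _ _, rfl⟩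
      · subst hs hr
        rw [if_pos (Or.inl trivial), pvSetLast_append]
        right
        refine ⟨rfl, pv_items_insert_ne_nil PySem.Dict.empty _ _, ?_⟩
        rw [if_neg (by simp [List.isEmpty_iff, hc])]
        rfl
    | false =>
      cases hP : PySem.Chars.startswith (PySem.Chars.strip raw) "Position:".toList with
      | true =>
        simp only [Bool.false_eq_true, if_false, if_true, pvGroupStep]
        rcases h with ⟨hs, hc, hl, hr⟩ | ⟨hs, hc, hr⟩
        · subst hs hc hl hr
          rw [if_pos (Or.inr rfl), pvSetLast_append]
          right
          exact ⟨rfl, pv_items_insert_ne_nil _ _ _, rfl⟩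
        · subst hs hr
          rw [if_neg (by simp), pvSetLast_append]
          right
          exact ⟨rfl, pv_items_insert_ne_nil _ _ _, rfl⟩
      | false =>
        cases hB : PySem.Chars.startswith (PySem.Chars.strip raw) "Background:".toList with
        | true =>
          simp only [Bool.false_eq_true, if_false, if_true, pvGroupStep]
          rcases h with ⟨hs, hc, hl, hr⟩ | ⟨hs, hc, hr⟩
          · subst hs hc hl hr
            rw [if_pos (Or.inr rfl), pvSetLast_append]
            right
            exact ⟨rfl, pv_items_insert_ne_nil _ _ _, rfl⟩
          · subst hs hr
            rw [if_neg (by simp), pvSetLast_append]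
            right
            exact ⟨rfl, pv_items_insert_ne_nil _ _ _, rfl⟩
        | false =>
          simp only [Bool.false_eq_true, if_false]
          exact h

lemma pvMain (lines : List (List Char)) : ∀ lA cA rB sB, pvInv lA cA rB sB →
    pvFinishA (lines.foldl pvStepA (lA, cA)) = (lines.foldl pvLineStepB (rB, sB)).1 := by
  induction lines with
  | nil =>
    intro lA cA rB sB h
    rcases h with ⟨_, hc, hl, hr⟩ | ⟨_, hc, hr⟩
    · simp [pvFinishA, hc, hl, hr, PySem.Dict.empty]
    · simp [pvFinishA, hr, List.isEmpty_iff, hc]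
  | cons raw rest ih =>
    intro lA cA rB sB h
    simp only [List.foldl_cons]
    have := pvStepInv raw lA cA rB sB h
    simpa using ih _ _ _ _ this

-- ===== VERDICT (by name: the statement is the Claim_ definition above) =====
theorem parse_leadership_section_py_spec : Claim_equal_parse_leadership_section_py := by
  intro section_ _
  unfold Spec_parse_leadership_section_py parse_leadership_section_py parse_leadership_section_py_alt
  simp only []
  rw [pvCompose]
  simp only [List.foldl_nil]
  have := pvMain (PySem.Chars.splitOn section_.toList "\n".toList) [] PySem.Dict.empty [] false
    (Or.inl ⟨rfl, rfl, rfl, rfl⟩)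
  unfold pvFinishA at this
  rw [this]
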